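-- pv_equiv track=rewrite | github.com/kskim625/algorithm | python/n진수게임.py | solution
-- ===== SOURCE A (Python) =====
-- def solution(n, t, m, p):
--     answer = ''
--
--     from collections import deque
--     queue = deque([0, 1])
--
--     myturn = 1
--     temp = ''
--     i = 2
--     while len(answer) != t:
--         if not queue:
--             x = i
--             while x > n-1:
--                 queue.appendleft(x%n)
--                 x = x//n
--             if x != 0:
--                 queue.appendleft(x)
--             i += 1
--         num = queue.popleft()
--         if num == 10:
--             temp = 'A'
--         elif num == 11:
--             temp = 'B'
--         elif num == 12:
--             temp = 'C'
--         elif num == 13: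
--             temp = 'D'
--         elif num == 14:
--             temp = 'E'
--         elif num == 15:
--             temp = 'F'
--         else:
--             temp = num
--         if myturn == p:
--             answer += str(temp)
--         myturn += 1
--         if myturn == m+1:
--             myturn = 1
--
--     return answer
-- ===== SOURCE B (Python) =====
-- def solution(n, t, m, p):
--     DIG = "0123456789ABCDEF"
--     seq = [0, 1]
--     last = p - 1 + (t - 1) * m
--     i = 2
--     while t > 0 and len(seq) <= last:
--         ds = []
--         x = i
--         while x:
--             ds.append(x % n)
--             x //= n
--         seq.extend(reversed(ds))
--         i += 1
--     return "".join(DIG[seq[p - 1 + k * m]] for k in range(t))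
-- ===== Notes on version B (the rewrite author's own statement) =====
-- stated objective: alternative
-- what changed: B drops the deque/turn-counter simulation: it precomputes the last needed global digit index, builds the game's digit sequence as one flat integer list, and reads player p's digits off by stride indexing seq[p-1+k*m] through a hex-digit table.
-- outside the precondition, e.g. on solution(17, 18, 1, 1): A returns '0123456789ABCDEF16', B raises IndexError; on solution(-1, 3, 2, 1): A returns '0-2', B does not finish within the time limit
import Mathlib
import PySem

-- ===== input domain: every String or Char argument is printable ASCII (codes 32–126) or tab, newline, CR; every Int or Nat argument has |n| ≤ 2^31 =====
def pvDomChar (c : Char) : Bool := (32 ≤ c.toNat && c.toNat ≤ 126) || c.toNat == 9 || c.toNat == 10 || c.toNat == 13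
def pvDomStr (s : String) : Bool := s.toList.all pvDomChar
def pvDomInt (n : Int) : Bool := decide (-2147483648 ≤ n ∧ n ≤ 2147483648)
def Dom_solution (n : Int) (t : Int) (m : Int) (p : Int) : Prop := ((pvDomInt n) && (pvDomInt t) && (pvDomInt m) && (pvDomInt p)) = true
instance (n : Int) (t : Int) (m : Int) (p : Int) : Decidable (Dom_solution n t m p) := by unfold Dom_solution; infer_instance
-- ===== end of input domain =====

-- B replaces A's deque/turn-counter simulation by building the digit sequence as one
-- flat integer list up to the last needed index and stride-indexing it (alternative
-- decomposition, same cost).  Equivalence is claimed on Pre_solution only.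

-- ===== PORT A =====
-- str(temp) where temp is 'A'..'F' for 10..15, otherwise the int num itself
def solTemp (num : Int) : String :=
  if num = 10 then "A" else if num = 11 then "B" else if num = 12 then "C"
  else if num = 13 then "D" else if num = 14 then "E" else if num = 15 then "F"
  else PySem.Int.toStr num

-- inner `while x > n-1: queue.appendleft(x%n); x = x//n` (fuel: x strictly shrinks for n ≥ 2)
def solConvA (n : Int) : Nat → Int → List Int → Int × List Int
  | 0, x, q => (x, q)
  | f+1, x, q =>
      if x > n - 1 then solConvA n f (PySem.Int.floordiv x n) (PySem.Int.mod x n :: q)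
      else (x, q)

-- outer `while len(answer) != t` loop (fuel is ample on Pre_solution)
def solLoopA (n t m p : Int) : Nat → String → List Int → Int → Int → String
  | 0, ans, _, _, _ => ans
  | f+1, ans, queue, myturn, i =>
      if (ans.length : Int) = t then ans
      else
        let qi : List Int × Int :=
          if queue = [] then
            let r := solConvA n (i.toNat + 1) i []
            (if r.1 ≠ 0 then r.1 :: r.2 else r.2, i + 1)
          else (queue, i)
        match qi.1 with
        | [] => ans   -- queue.popleft() on an empty deque raises IndexError: outside Pre_solution
        | num :: rest =>
          solLoopA n t m p f
            (if myturn = p then ans ++ solTemp num else ans) rest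
            (if myturn + 1 = m + 1 then 1 else myturn + 1) qi.2

def solution (n : Int) (t : Int) (m : Int) (p : Int) : String :=
  solLoopA n t m p ((t.natAbs + 2) * (m.natAbs + 2) + p.natAbs + 10) "" [0, 1] 1 2

-- ===== PORT B =====
-- inner `while x: ds.append(x % n); x //= n`
def solConvB (n : Int) : Nat → Int → List Int → List Int
  | 0, _, ds => ds
  | f+1, x, ds =>
      if x ≠ 0 then solConvB n f (PySem.Int.floordiv x n) (ds ++ [PySem.Int.mod x n])
      else ds

-- `while t > 0 and len(seq) <= last:` build loop
def solBuildB (n last t : Int) : Nat → List Int → Int → List Int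
  | 0, seq, _ => seq
  | f+1, seq, i =>
      if 0 < t ∧ (seq.length : Int) ≤ last then
        solBuildB n last t f (seq ++ (solConvB n (i.toNat + 1) i []).reverse) (i + 1)
      else seq

def solution_alt (n : Int) (t : Int) (m : Int) (p : Int) : String :=
  let DIG := "0123456789ABCDEF"
  let last := p - 1 + (t - 1) * m
  let seq := solBuildB n last t (last.toNat + 1) [0, 1] 2
  String.join ((PySem.List.pyRange 0 t 1).map (fun k =>
    match PySem.Str.pyGet? DIG (PySem.List.pyGetD seq (p - 1 + k * m) 0) with
    | some ch => String.ofList [ch]   -- DIG[d] is the one-character string of that char (exact)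
    | none => ""))

-- ===== PRECONDITION & SPEC =====
-- Pre_ is the game's natural domain (plus the trivial t = 0 corner, on which A returns ''
-- for every n, m, p): outside it A either never terminates (n < 2, p < 1, p > m or t < 0,
-- except for tiny t served by the pre-seeded queue [0,1]) or, for n > 16 or n < 2 with
-- tiny t, emits multi-character str() tokens such as '16' or '-2' that are not single
-- base-n digits, which B's hex-digit table deliberately does not reproduce.
def Pre_solution (n : Int) (t : Int) (m : Int) (p : Int) : Prop :=
  t = 0 ∨ (2 ≤ n ∧ n ≤ 16 ∧ 1 ≤ p ∧ p ≤ m ∧ 0 ≤ t)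
instance (n : Int) (t : Int) (m : Int) (p : Int) : Decidable (Pre_solution n t m p) := by unfold Pre_solution; infer_instance
def pvWitness_solution : Int × Int × Int × Int := (16, 5, 3, 2)

def Spec_solution (n : Int) (t : Int) (m : Int) (p : Int) (out : String) : Prop := out = solution_alt n t m p
instance (n : Int) (t : Int) (m : Int) (p : Int) (out : String) : Decidable (Spec_solution n t m p out) := by unfold Spec_solution; infer_instance

-- ===== CLAIM (what is proved, stated in full; the proofs are below) =====
def Claim_equal_solution : Prop := ∀ (n : Int) (t : Int) (m : Int) (p : Int), Dom_solution n t m p → Pre_solution n t m p → Spec_solution n t m p (solution n t m p)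

-- ===== LEMMAS AND PROOFS =====

-- base-n digit list of x (the value the two conversion loops both compute)
def pvDigits (n x : Int) : List Int :=
  if h : 2 ≤ n ∧ n ≤ x then pvDigits n (PySem.Int.floordiv x n) ++ [PySem.Int.mod x n]
  else [x]
termination_by x.toNat
decreasing_by
  have h1 : PySem.Int.floordiv x n < x :=
    (PySem.Int.floordiv_lt_iff_lt_mul (by omega)).mpr (by nlinarith [h.1, h.2])
  have h2 : 0 ≤ PySem.Int.floordiv x n :=
    (PySem.Int.le_floordiv_iff_mul_le (by omega)).mpr (by omega)
  omega

-- the full digit stream of the game, truncated after the numbers 0,1,2,…,J+1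
def pvStream (n : Int) (J : Nat) : List Int :=
  0 :: 1 :: (List.range J).flatMap (fun k : Nat => pvDigits n (2 + (k : Int)))

-- the digit at global position idx of the (conceptually infinite) stream
def pvSget (n : Int) (idx : Nat) : Int := (pvStream n idx).getD idx 0

def pvCnt (m p : Int) (c : Nat) : Nat :=
  ((List.range c).filter (fun idx : Nat => (idx : Int) % m == p - 1)).length

def pvAns (n m p : Int) (c : Nat) : String :=
  String.join (((List.range c).filter (fun idx : Nat => (idx : Int) % m == p - 1)).map
    (fun idx => solTemp (pvSget n idx)))

def pvCf (t m p : Int) : Nat := ((t - 1) * m + p).toNat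

lemma pvDigits_ne_nil (n x : Int) : pvDigits n x ≠ [] := by
  unfold pvDigits; split <;> simp

lemma pvDigits_bounds_aux (n : Int) (hn : 2 ≤ n) :
    ∀ (N : Nat) (x : Int), x.toNat ≤ N → 1 ≤ x → ∀ d ∈ pvDigits n x, 0 ≤ d ∧ d < n := by
  intro N
  induction N with
  | zero => intro x h hx; omega
  | succ N ih =>
      intro x hxN hx d hd
      rw [pvDigits] at hd
      split at hd
      case isTrue hcond =>
        rcases List.mem_append.1 hd with hd1 | hd2
        · have hq1 : 1 ≤ PySem.Int.floordiv x n :=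
            (PySem.Int.le_floordiv_iff_mul_le (by omega)).mpr (by omega)
          have hqlt : PySem.Int.floordiv x n < x :=
            (PySem.Int.floordiv_lt_iff_lt_mul (by omega)).mpr (by nlinarith [hcond.1, hcond.2])
          exact ih _ (by omega) hq1 d hd1
        · have hd2' : d = PySem.Int.mod x n := by simpa using hd2
          subst hd2'
          rw [PySem.Int.mod_eq_emod_of_pos (by omega)]
          exact ⟨Int.emod_nonneg x (by omega), Int.emod_lt_of_pos x (by omega)⟩
      case isFalse hcond =>
        have : d = x := by simpa using hd
        subst this; omega

lemma pvDigits_bounds (n : Int) (hn : 2 ≤ n) :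
    ∀ x, 1 ≤ x → ∀ d ∈ pvDigits n x, 0 ≤ d ∧ d < n :=
  fun x hx => pvDigits_bounds_aux n hn x.toNat x le_rfl hx

lemma solConvA_spec (n : Int) (hn : 2 ≤ n) :
    ∀ (f : Nat) (x : Int) (q : List Int), 1 ≤ x → x.toNat ≤ f →
      (solConvA n f x q).1 :: (solConvA n f x q).2 = pvDigits n x ++ q ∧
        (solConvA n f x q).1 ≠ 0 := by
  intro f
  induction f with
  | zero => intro x q hx hf; omega
  | succ f ih =>
      intro x q hx hf
      simp only [solConvA]
      by_cases hcase : x > n - 1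
      · rw [if_pos hcase]
        have hq1 : 1 ≤ PySem.Int.floordiv x n :=
          (PySem.Int.le_floordiv_iff_mul_le (by omega)).mpr (by omega)
        have hqlt : PySem.Int.floordiv x n < x :=
          (PySem.Int.floordiv_lt_iff_lt_mul (by omega)).mpr (by nlinarith)
        obtain ⟨ih1, ih2⟩ := ih (PySem.Int.floordiv x n) (PySem.Int.mod x n :: q) hq1 (by omega)
        refine ⟨?_, ih2⟩
        rw [ih1]
        conv_rhs => rw [pvDigits]
        rw [dif_pos ⟨hn, (by omega : n ≤ x)⟩]
        simp
      · rw [if_neg hcase]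
        refine ⟨?_, by omega⟩
        rw [pvDigits, dif_neg (by omega)]
        simp

lemma solConvB_zero (n : Int) (f : Nat) (ds : List Int) : solConvB n f 0 ds = ds := by
  cases f <;> simp [solConvB]

lemma solConvB_spec (n : Int) (hn : 2 ≤ n) :
    ∀ (f : Nat) (x : Int) (ds : List Int), 1 ≤ x → x.toNat ≤ f →
      solConvB n f x ds = ds ++ (pvDigits n x).reverse := by
  intro f
  induction f with
  | zero => intro x ds hx hf; omega
  | succ f ih =>
      intro x ds hx hf
      simp only [solConvB]
      rw [if_pos (by omega : x ≠ 0)]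
      by_cases hcase : n ≤ x
      · have hq1 : 1 ≤ PySem.Int.floordiv x n :=
          (PySem.Int.le_floordiv_iff_mul_le (by omega)).mpr (by omega)
        have hqlt : PySem.Int.floordiv x n < x :=
          (PySem.Int.floordiv_lt_iff_lt_mul (by omega)).mpr (by nlinarith)
        rw [ih _ _ hq1 (by omega)]
        conv_rhs => rw [pvDigits]
        rw [dif_pos ⟨hn, hcase⟩]
        simp
      · have hq0 : PySem.Int.floordiv x n = 0 := by
          have h1 : PySem.Int.floordiv x n < 1 :=
            (PySem.Int.floordiv_lt_iff_lt_mul (by omega)).mpr (by omega)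
          have h2 : 0 ≤ PySem.Int.floordiv x n :=
            (PySem.Int.le_floordiv_iff_mul_le (by omega)).mpr (by omega)
          omega
        rw [hq0, solConvB_zero, pvDigits, dif_neg (by omega)]
        have : PySem.Int.mod x n = x := by
          rw [PySem.Int.mod_eq_emod_of_pos (by omega)]
          exact Int.emod_eq_of_lt (by omega) (by omega)
        simp [this]

lemma pvStream_succ (n : Int) (J : Nat) :
    pvStream n (J + 1) = pvStream n J ++ pvDigits n (2 + (J : Int)) := by
  simp [pvStream, List.range_succ]

lemma pvStream_length (n : Int) (J : Nat) : J + 2 ≤ (pvStream n J).length := by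
  induction J with
  | zero => simp [pvStream]
  | succ j ih =>
      rw [pvStream_succ]
      have := pvDigits_ne_nil n (2 + (j : Int))
      have : 1 ≤ (pvDigits n (2 + (j : Int))).length := by
        cases h : pvDigits n (2 + (j : Int)) with
        | nil => exact absurd h this
        | cons a l => simp
      simp only [List.length_append]; omega

lemma pvStream_prefix (n : Int) {J K : Nat} (h : J ≤ K) :
    pvStream n J <+: pvStream n K := by
  obtain ⟨d, rfl⟩ := Nat.exists_eq_add_of_le h
  clear h
  induction d with
  | zero => simp
  | succ e ih =>
      refine List.IsPrefix.trans ih ?_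
      rw [show J + (e+1) = (J + e) + 1 by omega, pvStream_succ]
      exact List.prefix_append _ _

lemma pvSget_eq (n : Int) (J : Nat) (idx : Nat) (h : idx < (pvStream n J).length) :
    (pvStream n J).getD idx 0 = pvSget n idx := by
  have hlen : idx < (pvStream n idx).length := by have := pvStream_length n idx; omega
  rcases le_total J idx with hJ | hJ
  · have hpre := pvStream_prefix n hJ
    unfold pvSget
    rw [List.getD_eq_getElem _ _ h, List.getD_eq_getElem _ _ hlen]
    exact (List.IsPrefix.getElem hpre h).symm ▸ rfl
  · have hpre := pvStream_prefix n hJ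
    unfold pvSget
    rw [List.getD_eq_getElem _ _ h, List.getD_eq_getElem _ _ hlen]
    exact (List.IsPrefix.getElem hpre hlen) ▸ rfl

lemma pvStream_bounds (n : Int) (hn : 2 ≤ n) (J : Nat) :
    ∀ d ∈ pvStream n J, 0 ≤ d ∧ d < n := by
  intro d hd
  unfold pvStream at hd
  rcases List.mem_cons.1 hd with rfl | hd'
  · omega
  rcases List.mem_cons.1 hd' with rfl | hd''
  · omega
  rcases List.mem_flatMap.1 hd'' with ⟨k, _, hkd⟩
  exact pvDigits_bounds n hn _ (by omega) d hkd

lemma pvSget_bounds (n : Int) (hn : 2 ≤ n) (idx : Nat) :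
    0 ≤ pvSget n idx ∧ pvSget n idx < n := by
  have hlen : idx < (pvStream n idx).length := by have := pvStream_length n idx; omega
  have : pvSget n idx ∈ pvStream n idx := by
    unfold pvSget; rw [List.getD_eq_getElem _ _ hlen]; exact List.getElem_mem hlen
  exact pvStream_bounds n hn idx _ this

lemma solTemp_length (d : Int) (h0 : 0 ≤ d) (h16 : d < 16) : (solTemp d).length = 1 := by
  interval_cases d <;> decide

lemma pvJoin_foldl (l : List String) :
    ∀ s : String, l.foldl (· ++ ·) s = s ++ String.join l := by
  induction l with
  | nil => intro s; simp [String.join]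
  | cons a l ih =>
      intro s
      simp only [List.foldl_cons, String.join] at *
      rw [ih]
      conv_rhs => rw [ih]
      simp [String.append_assoc]

lemma pvJoin_cons (a : String) (l : List String) :
    String.join (a :: l) = a ++ String.join l := by
  show (a :: l).foldl (· ++ ·) "" = _
  rw [List.foldl_cons, pvJoin_foldl]
  simp

lemma pvJoin_append (l1 l2 : List String) :
    String.join (l1 ++ l2) = String.join l1 ++ String.join l2 := by
  induction l1 with
  | nil => simp [String.join]
  | cons a l ih =>
      rw [List.cons_append, pvJoin_cons, pvJoin_cons, ih, String.append_assoc]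

lemma pvAns_succ (n m p : Int) (c : Nat) :
    pvAns n m p (c + 1) =
      pvAns n m p c ++ (if (c : Int) % m == p - 1 then solTemp (pvSget n c) else "") := by
  unfold pvAns
  rw [List.range_succ, List.filter_append, List.map_append, pvJoin_append]
  congr 1
  by_cases h : ((c : Int) % m == p - 1)
  · simp [h, String.join]
  · simp [h, String.join]

lemma pvCnt_succ (m p : Int) (c : Nat) :
    pvCnt m p (c + 1) = pvCnt m p c + (if (c : Int) % m == p - 1 then 1 else 0) := by
  unfold pvCnt
  rw [List.range_succ, List.filter_append, List.length_append]
  congr 1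
  by_cases h : ((c : Int) % m == p - 1) <;> simp [h]

lemma pvAns_length (n m p : Int) (hn : 2 ≤ n) (h16 : n ≤ 16) (c : Nat) :
    (pvAns n m p c).length = pvCnt m p c := by
  induction c with
  | zero => simp [pvAns, pvCnt, String.join]
  | succ c ih =>
      rw [pvAns_succ, pvCnt_succ, String.length_append, ih]
      by_cases h : ((c : Int) % m == p - 1)
      · rw [if_pos h, if_pos h]
        have hb := pvSget_bounds n hn c
        rw [solTemp_length _ hb.1 (by omega)]
      · rw [if_neg h, if_neg h]
        rfl

lemma predCast (m p : Int) (hp : 1 ≤ p) (hpm : p ≤ m) (idx : Nat) :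
    ((idx : Int) % m == p - 1) = (idx % m.toNat == p.toNat - 1) := by
  have h2 : m = (m.toNat : Int) := by omega
  have h3 : p - 1 = ((p.toNat - 1 : Nat) : Int) := by omega
  conv_lhs => rw [h2, h3, ← Int.natCast_mod]
  by_cases h : idx % m.toNat = p.toNat - 1
  · rw [h]; simp
  · have h' : ((idx % m.toNat : Nat) : Int) ≠ ((p.toNat - 1 : Nat) : Int) := by
      exact_mod_cast h
    rw [beq_eq_false_iff_ne.mpr h', beq_eq_false_iff_ne.mpr h]

lemma natdiv_step (M P c : Nat) (hP : 1 ≤ P) (hPM : P ≤ M) :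
    (c + 1 + M - P) / M = (c + M - P) / M + (if c % M = P - 1 then 1 else 0) := by
  have hM : 0 < M := by omega
  obtain ⟨q, r, hrM, hc⟩ : ∃ q r, r < M ∧ c = M * q + r :=
    ⟨c / M, c % M, Nat.mod_lt _ hM, (Nat.div_add_mod c M).symm⟩
  have hmod : c % M = r := by
    rw [hc, Nat.mul_add_mod]
    exact Nat.mod_eq_of_lt hrM
  rw [hmod]
  by_cases hcase : r = P - 1
  · rw [if_pos hcase]
    have e1 : c + M - P = (M - 1) + M * q := by
      generalize M * q = A at hc ⊢; omega
    have e2 : c + 1 + M - P = 0 + M * (q + 1) := by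
      have h2 : M * (q + 1) = M * q + M := by ring
      rw [h2]; generalize M * q = A at hc ⊢; omega
    rw [e1, e2, Nat.add_mul_div_left _ _ hM, Nat.add_mul_div_left _ _ hM,
        Nat.div_eq_of_lt (by omega), Nat.div_eq_of_lt (by omega)]
    omega
  · rw [if_neg hcase]
    by_cases hlt : r < P - 1
    · have e1 : c + M - P = (r + M - P) + M * q := by
        generalize M * q = A at hc ⊢; omega
      have e2 : c + 1 + M - P = (r + 1 + M - P) + M * q := by
        generalize M * q = A at hc ⊢; omega
      rw [e1, e2, Nat.add_mul_div_left _ _ hM, Nat.add_mul_div_left _ _ hM,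
          Nat.div_eq_of_lt (by omega), Nat.div_eq_of_lt (by omega)]
      omega
    · have e1 : c + M - P = (r - P) + M * (q + 1) := by
        have h2 : M * (q + 1) = M * q + M := by ring
        rw [h2]; generalize M * q = A at hc ⊢; omega
      have e2 : c + 1 + M - P = (r + 1 - P) + M * (q + 1) := by
        have h2 : M * (q + 1) = M * q + M := by ring
        rw [h2]; generalize M * q = A at hc ⊢; omega
      rw [e1, e2, Nat.add_mul_div_left _ _ hM, Nat.add_mul_div_left _ _ hM,
          Nat.div_eq_of_lt (by omega), Nat.div_eq_of_lt (by omega)]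
      omega

-- closed form for the count of indices < c congruent to p-1 mod m
lemma pvCnt_closed (m p : Int) (hp : 1 ≤ p) (hpm : p ≤ m) (c : Nat) :
    pvCnt m p c = (c + m.toNat - p.toNat) / m.toNat := by
  induction c with
  | zero =>
      have h0 : pvCnt m p 0 = 0 := by simp [pvCnt]
      rw [h0, Nat.div_eq_of_lt (by omega)]
  | succ c ih =>
      rw [pvCnt_succ, ih, predCast m p hp hpm c,
          natdiv_step m.toNat p.toNat c (by omega) (by omega)]
      by_cases h : c % m.toNat = p.toNat - 1 <;> simp [h]

lemma pvCnt_cf (t m p : Int) (hp : 1 ≤ p) (hpm : p ≤ m) (ht : 0 ≤ t) :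
    pvCnt m p (pvCf t m p) = t.toNat ∧
      ∀ c : Nat, c < pvCf t m p → pvCnt m p c < t.toNat := by
  have hM : 0 < m.toNat := by omega
  by_cases ht0 : t = 0
  · subst ht0
    have hcf : pvCf 0 m p = 0 := by unfold pvCf; omega
    constructor
    · rw [hcf]; simp [pvCnt]
    · intro c hc; rw [hcf] at hc; omega
  · have ht1 : 1 ≤ t := by omega
    obtain ⟨T, hT⟩ : ∃ T, t.toNat = T + 1 := ⟨t.toNat - 1, by omega⟩
    have h4 : (T + 1) * m.toNat = T * m.toNat + m.toNat := by ring
    have key : (t - 1) * m + p = (((t.toNat - 1) * m.toNat + p.toNat : Nat) : Int) := by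
      have k1 : ((t.toNat - 1 : Nat) : Int) = t - 1 := by omega
      have k2 : ((m.toNat : Nat) : Int) = m := by omega
      have k3 : ((p.toNat : Nat) : Int) = p := by omega
      rw [Nat.cast_add, Nat.cast_mul, k1, k2, k3]
    have hcf : pvCf t m p = (t.toNat - 1) * m.toNat + p.toNat := by
      unfold pvCf; rw [key, Int.toNat_natCast]
    constructor
    · rw [hcf, pvCnt_closed m p hp hpm, hT]
      simp only [Nat.add_sub_cancel]
      have e : T * m.toNat + p.toNat + m.toNat - p.toNat = (T + 1) * m.toNat := by
        rw [h4]; generalize T * m.toNat = A; omega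
      rw [e, Nat.mul_div_cancel _ hM]
    · intro c hc
      rw [pvCnt_closed m p hp hpm, Nat.div_lt_iff_lt_mul hM, hT, h4]
      rw [hcf, hT] at hc
      simp only [Nat.add_sub_cancel] at hc
      generalize T * m.toNat = A at hc ⊢
      omega

lemma myturn_step (m : Int) (hm : 1 ≤ m) (c : Nat) :
    (if ((c : Int) % m + 1) + 1 = m + 1 then (1 : Int) else ((c : Int) % m + 1) + 1)
      = ((c : Int) + 1) % m + 1 := by
  have h0 : 0 ≤ (c : Int) % m := Int.emod_nonneg _ (by omega)
  have h1 : (c : Int) % m < m := Int.emod_lt_of_pos _ (by omega)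
  have hdm : m * ((c : Int) / m) + (c : Int) % m = (c : Int) := Int.ediv_add_emod _ _
  by_cases hr : (c : Int) % m = m - 1
  · rw [if_pos (by omega)]
    have he : ((c : Int) + 1) % m = 0 := by
      have heq : (c : Int) + 1 = m * ((c : Int) / m + 1) := by rw [mul_add]; omega
      rw [heq]; exact Int.mul_emod_right _ _
    omega
  · rw [if_neg (by omega)]
    have he : ((c : Int) + 1) % m = (c : Int) % m + 1 := by
      have heq : (c : Int) + 1 = ((c : Int) % m + 1) + m * ((c : Int) / m) := by omega
      rw [heq, Int.add_mul_emod_self_left, Int.emod_eq_of_lt (by omega) (by omega)]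
    omega

lemma solLoopA_cons_step (n t m p : Int) (f : Nat) (ans : String) (num : Int)
    (rest : List Int) (myturn i : Int) (hne : ((ans.length : Int)) ≠ t) :
    solLoopA n t m p (f+1) ans (num :: rest) myturn i =
      solLoopA n t m p f (if myturn = p then ans ++ solTemp num else ans) rest
        (if myturn + 1 = m + 1 then 1 else myturn + 1) i := by
  simp only [solLoopA]
  rw [if_neg hne, if_neg (by simp : ¬(num :: rest = ([] : List Int)))]

lemma solLoopA_refill (n t m p : Int) (hn : 2 ≤ n) (f : Nat) (ans : String)
    (myturn i : Int) (hi : 1 ≤ i) (hne : ((ans.length : Int)) ≠ t)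
    (num : Int) (rest : List Int) (hdig : pvDigits n i = num :: rest) :
    solLoopA n t m p (f+1) ans [] myturn i =
      solLoopA n t m p f (if myturn = p then ans ++ solTemp num else ans) rest
        (if myturn + 1 = m + 1 then 1 else myturn + 1) (i + 1) := by
  simp only [solLoopA]
  rw [if_neg hne, if_pos trivial]
  obtain ⟨h1, h2⟩ := solConvA_spec n hn (i.toNat + 1) i [] hi (by omega)
  rw [List.append_nil, hdig] at h1
  rw [if_pos h2]
  obtain ⟨hr1, hr2⟩ : (solConvA n (i.toNat + 1) i []).1 = num ∧
      (solConvA n (i.toNat + 1) i []).2 = rest := by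
    exact ⟨by injection h1, by injection h1⟩
  rw [hr1, hr2]

lemma loopA_eq (n t m p : Int) (hn : 2 ≤ n) (h16 : n ≤ 16) (hp : 1 ≤ p) (hpm : p ≤ m)
    (ht : 0 ≤ t) :
    ∀ (f c j : Nat), pvCf t m p ≤ f + c → c ≤ pvCf t m p → c ≤ (pvStream n j).length →
      solLoopA n t m p f (pvAns n m p c) ((pvStream n j).drop c) ((c : Int) % m + 1)
          (2 + (j : Int))
        = pvAns n m p (pvCf t m p) := by
  have hm : 1 ≤ m := by omega
  intro f
  induction f with
  | zero =>
      intro c j h1 h2 h3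
      have hc : c = pvCf t m p := by omega
      simp only [solLoopA]
      rw [hc]
  | succ f ih =>
      intro c j h1 h2 h3
      have hfacts := pvCnt_cf t m p hp hpm ht
      have hlen : (pvAns n m p c).length = pvCnt m p c := pvAns_length n m p hn h16 c
      by_cases hstop : c = pvCf t m p
      · have hcnt : pvCnt m p c = t.toNat := by rw [hstop]; exact hfacts.1
        simp only [solLoopA]
        rw [if_pos (by rw [hlen, hcnt]; omega), hstop]
      · have hlt : c < pvCf t m p := by omega
        have hcnt : pvCnt m p c < t.toNat := hfacts.2 c hlt
        have hne : ((pvAns n m p c).length : Int) ≠ t := by rw [hlen]; omega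
        -- one common step, with j' the index after a possible refill
        have hstep : ∀ (j' : Nat) (hcl : c < (pvStream n j').length),
            solLoopA n t m p f
              (if (c : Int) % m + 1 = p then pvAns n m p c ++ solTemp ((pvStream n j')[c]'hcl)
               else pvAns n m p c)
              ((pvStream n j').drop (c+1))
              (if ((c : Int) % m + 1) + 1 = m + 1 then 1 else ((c : Int) % m + 1) + 1)
              (2 + (j' : Int))
            = pvAns n m p (pvCf t m p) := by
          intro j' hc'
          have hnum : (pvStream n j')[c]'(by omega) = pvSget n c := by
            rw [← List.getD_eq_getElem _ 0 hc']
            exact pvSget_eq n j' c hc'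
          have hans : (if (c : Int) % m + 1 = p then
                pvAns n m p c ++ solTemp ((pvStream n j')[c]'(by omega))
              else pvAns n m p c) = pvAns n m p (c+1) := by
            rw [pvAns_succ, hnum]
            by_cases hpp : (c : Int) % m + 1 = p
            · rw [if_pos hpp, if_pos (beq_iff_eq.mpr (by omega))]
            · rw [if_neg hpp, if_neg (by simp [beq_iff_eq]; omega)]
              simp
          rw [hans, myturn_step m hm c]
          have hcast1 : ((c : Int) + 1) % m + 1 = (((c+1 : Nat) : Int)) % m + 1 := by
            push_cast; ring_nf
          rw [hcast1]
          exact ih (c+1) j' (by omega) (by omega) (by omega)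
        by_cases hq : (pvStream n j).drop c = []
        · have hcl : (pvStream n j).length ≤ c := List.drop_eq_nil_iff.mp hq
          have hceq : c = (pvStream n j).length := by omega
          have hdig_ne := pvDigits_ne_nil n (2 + (j : Int))
          obtain ⟨num, rest, hdig⟩ : ∃ a l, pvDigits n (2 + (j : Int)) = a :: l := by
            cases hd : pvDigits n (2 + (j : Int)) with
            | nil => exact absurd hd hdig_ne
            | cons a l => exact ⟨a, l, rfl⟩
          rw [hq, solLoopA_refill n t m p hn f _ _ _ (by omega) hne num rest hdig]
          have hc' : c < (pvStream n (j+1)).length := by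
            rw [pvStream_succ, List.length_append, hdig]
            simp; omega
          have hdrop : (pvStream n (j+1)).drop c = num :: rest := by
            rw [pvStream_succ]
            conv_lhs => rw [hceq]
            rw [List.drop_left, hdig]
          have hget : (pvStream n (j+1))[c]'(by omega) = num := by
            rw [List.drop_eq_getElem_cons hc'] at hdrop
            injection hdrop
          have hrest : rest = (pvStream n (j+1)).drop (c+1) := by
            rw [List.drop_eq_getElem_cons hc'] at hdrop
            injection hdrop with _ h'
            exact h'.symm
          have hcast2 : (2 + (j : Int)) + 1 = 2 + ((j + 1 : Nat) : Int) := by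
            push_cast; ring
          rw [← hget, hrest, hcast2]
          exact hstep (j+1) hc'
        · have hc' : c < (pvStream n j).length := by
            by_contra hx
            push_neg at hx
            exact hq (List.drop_eq_nil_iff.mpr hx)
          rw [List.drop_eq_getElem_cons hc', solLoopA_cons_step n t m p f _ _ _ _ _ hne]
          exact hstep j hc'

lemma buildB_eq (n last t : Int) (hn : 2 ≤ n) (ht : 0 < t) :
    ∀ (f j : Nat), last.toNat < f + (pvStream n j).length →
      ∃ J : Nat, solBuildB n last t f (pvStream n j) (2 + (j : Int)) = pvStream n J ∧
        last < ((pvStream n J).length : Int) := by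
  intro f
  induction f with
  | zero =>
      intro j h
      exact ⟨j, by simp [solBuildB], by omega⟩
  | succ f ih =>
      intro j h
      by_cases hc : ((pvStream n j).length : Int) ≤ last
      · have hx1 : (1 : Int) ≤ 2 + (j : Int) := by omega
        have hcond : 0 < t ∧ ((pvStream n j).length : Int) ≤ last := ⟨ht, hc⟩
        have hconv : solConvB n ((2 + (j : Int)).toNat + 1) (2 + (j : Int)) [] =
            (pvDigits n (2 + (j : Int))).reverse := by
          rw [solConvB_spec n hn _ _ _ hx1 (by omega)]; simp
        have hstep : solBuildB n last t (f+1) (pvStream n j) (2 + (j : Int)) =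
            solBuildB n last t f (pvStream n (j+1)) (2 + ((j + 1 : Nat) : Int)) := by
          simp only [solBuildB]
          rw [if_pos hcond, hconv, List.reverse_reverse, ← pvStream_succ,
              show (2 + (j : Int)) + 1 = 2 + ((j + 1 : Nat) : Int) by push_cast; ring]
        rw [hstep]
        apply ih
        have hne := pvDigits_ne_nil n (2 + (j : Int))
        have hpos : 0 < (pvDigits n (2 + (j : Int))).length := by
          cases hd : pvDigits n (2 + (j : Int)) with
          | nil => exact absurd hd hne
          | cons a l => simp
        have hl1 : (pvStream n j).length + 1 ≤ (pvStream n (j+1)).length := by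
          rw [pvStream_succ, List.length_append]; omega
        omega
      · refine ⟨j, ?_, by omega⟩
        simp only [solBuildB]
        rw [if_neg (by intro hx; exact hc hx.2)]

-- the selected positions form an arithmetic progression
lemma filter_range_mod (M P : Nat) (hP : 1 ≤ P) (hPM : P ≤ M) (T : Nat) :
    (List.range (T * M + P)).filter (fun idx => idx % M == P - 1)
      = (List.range (T + 1)).map (fun k => (P - 1) + k * M) := by
  induction T with
  | zero =>
      simp only [Nat.zero_mul, Nat.zero_add]
      have hsplit : List.range P = List.range (P - 1) ++ [P - 1] := by
        conv_lhs => rw [show P = (P - 1) + 1 by omega]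
        rw [List.range_succ]
      rw [hsplit, List.filter_append]
      have h1 : (List.range (P - 1)).filter (fun idx => idx % M == P - 1) = [] := by
        refine List.filter_eq_nil_iff.mpr ?_
        intro r hr
        rw [List.mem_range] at hr
        have : r % M = r := Nat.mod_eq_of_lt (by omega)
        simp [this]; omega
      have h2 : (P - 1) % M = P - 1 := Nat.mod_eq_of_lt (by omega)
      simp [h1, h2]
  | succ T ih =>
      have hM : 0 < M := by omega
      have e : (T + 1) * M + P = (T * M + P) + M := by ring
      rw [e, List.range_add, List.filter_append, ih, List.filter_map]
      have hone : (List.range M).filter ((fun idx => idx % M == P - 1) ∘ (fun r => T * M + P + r))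
          = [M - 1] := by
        have hpt : ∀ r ∈ List.range M,
            ((fun idx => idx % M == P - 1) ∘ (fun r => T * M + P + r)) r = (r == M - 1) := by
          intro r hr
          rw [List.mem_range] at hr
          have hmod : (T * M + P + r) % M = (if M ≤ P + r then P + r - M else P + r) := by
            have hre : T * M + P + r = (P + r) + M * T := by ring
            rw [hre, Nat.add_mul_mod_self_left]
            by_cases hle : M ≤ P + r
            · rw [if_pos hle, Nat.mod_eq_sub_mod hle, Nat.mod_eq_of_lt (by omega)]
            · rw [if_neg hle, Nat.mod_eq_of_lt (by omega)]
          simp only [Function.comp, hmod]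
          by_cases hle : M ≤ P + r
          · rw [if_pos hle]
            by_cases hr1 : r = M - 1 <;> simp [hr1] <;> omega
          · rw [if_neg hle]
            by_cases hr1 : r = M - 1 <;> simp [hr1] <;> omega
        rw [List.filter_congr hpt]
        have hsplit : List.range M = List.range (M - 1) ++ [M - 1] := by
          conv_lhs => rw [show M = (M - 1) + 1 by omega]
          rw [List.range_succ]
        rw [hsplit, List.filter_append]
        have h1 : (List.range (M - 1)).filter (fun r => r == M - 1) = [] := by
          refine List.filter_eq_nil_iff.mpr ?_
          intro r hr
          rw [List.mem_range] at hr
          simp; omega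
        simp [h1]
      rw [hone]
      have hrhs : List.range (T + 1 + 1) = List.range (T + 1) ++ [T + 1] := List.range_succ
      rw [hrhs, List.map_append]
      congr 1
      simp only [List.map_cons, List.map_nil]
      congr 1
      have h4 : (T + 1) * M = T * M + M := by ring
      rw [h4]
      generalize T * M = A
      omega

lemma solLoopA_t0 (n m p : Int) (f : Nat) (q : List Int) (mt i : Int) :
    solLoopA n 0 m p f "" q mt i = "" := by
  cases f <;> simp [solLoopA]

lemma solution_t0 (n m p : Int) : solution n 0 m p = "" := by
  unfold solution
  exact solLoopA_t0 n m p _ _ _ _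

lemma solution_alt_t0 (n m p : Int) : solution_alt n 0 m p = "" := by
  simp only [solution_alt]
  rw [show PySem.List.pyRange 0 0 1 = [] by decide]
  simp [String.join]

theorem solution_eq_ref (n t m p : Int)
    (h : 2 ≤ n ∧ n ≤ 16 ∧ 1 ≤ p ∧ p ≤ m ∧ 0 ≤ t) :
    solution n t m p = pvAns n m p (pvCf t m p) := by
  obtain ⟨hn, h16, hp, hpm, ht⟩ := h
  unfold solution
  have hfuel : pvCf t m p ≤ ((t.natAbs + 2) * (m.natAbs + 2) + p.natAbs + 10) + 0 := by
    unfold pvCf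
    rw [Nat.add_zero]
    apply Int.toNat_le.mpr
    push_cast
    rw [abs_of_nonneg ht, abs_of_nonneg (show (0:Int) ≤ m by omega),
        abs_of_nonneg (show (0:Int) ≤ p by omega)]
    nlinarith
  have hlen0 : (0 : Nat) ≤ (pvStream n 0).length := Nat.zero_le _
  have := loopA_eq n t m p hn h16 hp hpm ht
    ((t.natAbs + 2) * (m.natAbs + 2) + p.natAbs + 10) 0 0 hfuel (Nat.zero_le _) hlen0
  simpa [pvAns, pvStream, String.join] using this

lemma pvDigChar (d : Int) (h0 : 0 ≤ d) (h16 : d < 16) :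
    (match PySem.Str.pyGet? "0123456789ABCDEF" d with
      | some ch => String.ofList [ch]
      | none => "") = solTemp d := by
  interval_cases d <;> decide

theorem solution_alt_eq_ref (n t m p : Int)
    (h : 2 ≤ n ∧ n ≤ 16 ∧ 1 ≤ p ∧ p ≤ m ∧ 0 ≤ t) :
    solution_alt n t m p = pvAns n m p (pvCf t m p) := by
  obtain ⟨hn, h16, hp, hpm, ht⟩ := h
  simp only [solution_alt]
  by_cases ht0 : t = 0
  · subst ht0
    have hr : PySem.List.pyRange 0 0 1 = [] := by decide
    have hcf : pvCf 0 m p = 0 := by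
      unfold pvCf
      rw [show ((0 : Int) - 1) * m + p = p - m by ring]
      omega
    rw [hr, hcf]
    simp [pvAns, String.join]
  · have ht1 : 1 ≤ t := by omega
    have hmul0 : 0 ≤ (t - 1) * m := mul_nonneg (by omega) (by omega)
    have hlen2 : (pvStream n 0).length = 2 := by simp [pvStream]
    obtain ⟨J, hJ, hJlen⟩ := buildB_eq n (p - 1 + (t - 1) * m) t hn (by omega)
      ((p - 1 + (t - 1) * m).toNat + 1) 0 (by omega)
    rw [show ([0, 1] : List Int) = pvStream n 0 by simp [pvStream],
        show (2 : Int) = 2 + ((0 : Nat) : Int) by simp, hJ]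
    have htT : t = (t.toNat : Int) := by omega
    conv_lhs => rw [htT, PySem.List.pyRange_zero_natCast, List.map_map]
    unfold pvAns
    have hfilt : (List.range (pvCf t m p)).filter (fun idx : Nat => (idx : Int) % m == p - 1)
        = (List.range t.toNat).map (fun k => (p.toNat - 1) + k * m.toNat) := by
      rw [List.filter_congr (fun idx _ => predCast m p hp hpm idx)]
      obtain ⟨T', hT'⟩ : ∃ T', t.toNat = T' + 1 := ⟨t.toNat - 1, by omega⟩
      have key : (t - 1) * m + p = ((T' * m.toNat + p.toNat : Nat) : Int) := by
        have k1 : ((m.toNat : Nat) : Int) = m := by omega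
        have k2 : ((p.toNat : Nat) : Int) = p := by omega
        have k3 : ((T' : Nat) : Int) = t - 1 := by omega
        rw [Nat.cast_add, Nat.cast_mul, k1, k2, k3]
      have hcf2 : pvCf t m p = T' * m.toNat + p.toNat := by
        unfold pvCf
        rw [key, Int.toNat_natCast]
      rw [hcf2, hT']
      exact filter_range_mod m.toNat p.toNat (by omega) (by omega) T'
    rw [hfilt, List.map_map]
    refine congrArg String.join (List.map_congr_left ?_)
    intro k hk
    rw [List.mem_range] at hk
    simp only [Function.comp]
    have hidx : p - 1 + (k : Int) * m = (((p.toNat - 1) + k * m.toNat : Nat) : Int) := by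
      have k1 : ((m.toNat : Nat) : Int) = m := by omega
      have k2 : ((p.toNat - 1 : Nat) : Int) = p - 1 := by omega
      rw [Nat.cast_add, Nat.cast_mul, k1, k2]
    have hle : p - 1 + (k : Int) * m ≤ p - 1 + (t - 1) * m := by
      have hkm : (k : Int) * m ≤ (t - 1) * m :=
        mul_le_mul_of_nonneg_right (by omega) (by omega)
      omega
    have hidxlt : (p.toNat - 1) + k * m.toNat < (pvStream n J).length := by
      have h1 := hle
      have h2 := hJlen
      have h3 := hidx
      generalize (p.toNat - 1) + k * m.toNat = X at h3 ⊢
      generalize p - 1 + (k : Int) * m = iI at h3 h1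
      generalize (t - 1) * m = A at h1 h2
      omega
    have hget : PySem.List.pyGetD (pvStream n J) (p - 1 + (k : Int) * m) 0
        = pvSget n ((p.toNat - 1) + k * m.toNat) := by
      rw [hidx, PySem.List.pyGetD_natCast]
      exact pvSget_eq n J _ hidxlt
    rw [hget]
    have hb := pvSget_bounds n hn ((p.toNat - 1) + k * m.toNat)
    exact pvDigChar _ hb.1 (by omega)
-- ===== VERDICT (by name: the statement is the Claim_ definition above) =====
theorem solution_spec : Claim_equal_solution := by
  intro n t m p _ hpre
  unfold Spec_solution
  rcases hpre with ht0 | hreg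
  · subst ht0
    rw [solution_t0, solution_alt_t0]
  · rw [solution_eq_ref n t m p hreg, solution_alt_eq_ref n t m p hreg]
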